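-- pv_equiv track=rewrite | github.com/RamiroS1/girona-deploy | girona-back/app/seed_girona_data.py | _assign_category
-- ===== SOURCE A (Python) =====
-- def _assign_category(lineno: int, name: str) -> str:
--     n = name.upper()
--     if any(k in n for k in ("CREPE", "WAFLE", "CUAJADA EN REDUCCION", "DULCE TENTACION", "DULCE ")):
--         return "Postres"
--     if lineno < 126:
--         if "ENSALADA" in n or "VINAGRETA" in n:
--             return "Ensaladas"
--         return "Entradas"
--     if 126 <= lineno < 721:
--         return "Platos fuertes"
--     if 721 <= lineno < 802:
--         return "Platos especiales"
--     if lineno >= 802 and lineno < 838: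
--         return "Menú infantil"
--     return "Postres"
-- ===== SOURCE B (Python) =====
-- _BOUNDS = (126, 721, 802, 838)
-- _LABELS = ("Platos fuertes", "Platos especiales", "Menú infantil", "Postres")
--
--
-- def _assign_category(lineno: int, name: str) -> str:
--     n = name.upper()
--     # "DULCE TENTACION" contains "DULCE ", so four dessert keywords suffice
--     if "CREPE" in n or "WAFLE" in n or "CUAJADA EN REDUCCION" in n or "DULCE " in n:
--         return "Postres"
--     lo, hi = 0, len(_BOUNDS)
--     while lo < hi:  # binary search: lo ends as the number of boundaries <= lineno
--         mid = (lo + hi) // 2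
--         if lineno < _BOUNDS[mid]:
--             hi = mid
--         else:
--             lo = mid + 1
--     if lo == 0:
--         return "Ensaladas" if ("ENSALADA" in n or "VINAGRETA" in n) else "Entradas"
--     return _LABELS[lo - 1]
-- ===== Notes on version B (the rewrite author's own statement) =====
-- stated objective: alternative
-- what changed: B drops the redundant dessert keyword "DULCE TENTACION" (it contains "DULCE ") and replaces A's chain of hard-coded range comparisons by a hand-written binary search over the sorted boundary list (126, 721, 802, 838) that computes the category index, then maps it through a label table.
import Mathlib
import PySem

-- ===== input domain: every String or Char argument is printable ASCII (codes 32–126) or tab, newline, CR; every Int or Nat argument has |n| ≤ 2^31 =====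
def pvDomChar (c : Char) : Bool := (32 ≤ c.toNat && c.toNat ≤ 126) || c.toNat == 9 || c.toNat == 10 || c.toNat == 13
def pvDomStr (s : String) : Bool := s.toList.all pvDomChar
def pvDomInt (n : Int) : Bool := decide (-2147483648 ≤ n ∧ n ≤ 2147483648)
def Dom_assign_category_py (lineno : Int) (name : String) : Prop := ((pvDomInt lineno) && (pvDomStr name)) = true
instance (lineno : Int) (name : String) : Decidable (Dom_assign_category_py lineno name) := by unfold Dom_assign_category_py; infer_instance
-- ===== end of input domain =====

-- B drops the redundant "DULCE TENTACION" keyword (it contains "DULCE ") and replaces A's if-chain of range branches by a binary search over the sorted boundary list; objective: alternative, same cost.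


-- ===== PORT A =====
def assign_category_py (lineno : Int) (name : String) : String :=
  let n := PySem.Str.upper name
  if ["CREPE", "WAFLE", "CUAJADA EN REDUCCION", "DULCE TENTACION", "DULCE "].any
      (fun k => PySem.Str.isIn k n) then "Postres"
  else if lineno < 126 then
    (if PySem.Str.isIn "ENSALADA" n || PySem.Str.isIn "VINAGRETA" n then "Ensaladas"
     else "Entradas")
  else if 126 ≤ lineno ∧ lineno < 721 then "Platos fuertes"
  else if 721 ≤ lineno ∧ lineno < 802 then "Platos especiales"
  else if lineno ≥ 802 ∧ lineno < 838 then "Menú infantil"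
  else "Postres"

-- ===== PORT B =====
def pvBounds : List Int := [126, 721, 802, 838]
def pvLabels : List String := ["Platos fuertes", "Platos especiales", "Menú infantil", "Postres"]

-- the while-loop of B: binary search, lo ends as the number of boundaries ≤ lineno
def pvBisect (lineno : Int) (lo hi : Nat) : Nat :=
  if h : lo < hi then
    let mid := (lo + hi) / 2
    if lineno < pvBounds.getD mid 0 then pvBisect lineno lo mid
    else pvBisect lineno (mid + 1) hi
  else lo
termination_by hi - lo
decreasing_by all_goals omega

def assign_category_py_alt (lineno : Int) (name : String) : String :=
  let n := PySem.Str.upper name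
  if PySem.Str.isIn "CREPE" n || PySem.Str.isIn "WAFLE" n ||
     PySem.Str.isIn "CUAJADA EN REDUCCION" n || PySem.Str.isIn "DULCE " n then "Postres"
  else
    let lo := pvBisect lineno 0 pvBounds.length
    if lo = 0 then
      (if PySem.Str.isIn "ENSALADA" n || PySem.Str.isIn "VINAGRETA" n then "Ensaladas"
       else "Entradas")
    else pvLabels.getD (lo - 1) ""

-- ===== PRECONDITION & SPEC =====
def Spec_assign_category_py (lineno : Int) (name : String) (out : String) : Prop := out = assign_category_py_alt lineno name
instance (lineno : Int) (name : String) (out : String) : Decidable (Spec_assign_category_py lineno name out) := by unfold Spec_assign_category_py; infer_instance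

-- ===== CLAIM =====
def Claim_equal_assign_category_py : Prop := ∀ (lineno : Int) (name : String), Dom_assign_category_py lineno name → Spec_assign_category_py lineno name (assign_category_py lineno name)

-- ===== LEMMAS AND PROOFS =====
-- "DULCE " is an infix of "DULCE TENTACION", so A's extra keyword is redundant
lemma dulce_chars (l : List Char)
    (h : PySem.Chars.isIn ['D','U','L','C','E',' ','T','E','N','T','A','C','I','O','N'] l = true) :
    PySem.Chars.isIn ['D','U','L','C','E',' '] l = true := by
  rw [PySem.Chars.isIn_iff_infix] at h ⊢
  exact List.IsInfix.trans (by decide) h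

lemma pvB00 (l : Int) : pvBisect l 0 0 = 0 := by rw [pvBisect]; norm_num
lemma pvB11 (l : Int) : pvBisect l 1 1 = 1 := by rw [pvBisect]; norm_num
lemma pvB22 (l : Int) : pvBisect l 2 2 = 2 := by rw [pvBisect]; norm_num
lemma pvB33 (l : Int) : pvBisect l 3 3 = 3 := by rw [pvBisect]; norm_num
lemma pvB44 (l : Int) : pvBisect l 4 4 = 4 := by rw [pvBisect]; norm_num
lemma pvB01 (l : Int) : pvBisect l 0 1 = if l < 126 then 0 else 1 := by
  rw [pvBisect]; norm_num [pvBounds, pvB00, pvB11]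
lemma pvB02 (l : Int) : pvBisect l 0 2 = if l < 721 then (if l < 126 then 0 else 1) else 2 := by
  rw [pvBisect]; norm_num [pvBounds, pvB01, pvB22]
lemma pvB34 (l : Int) : pvBisect l 3 4 = if l < 838 then 3 else 4 := by
  rw [pvBisect]; norm_num [pvBounds, pvB33, pvB44]
lemma pvBisect_eval (lineno : Int) :
    pvBisect lineno 0 4 =
      (if lineno < 126 then 0 else if lineno < 721 then 1
       else if lineno < 802 then 2 else if lineno < 838 then 3 else 4) := by
  rw [pvBisect]; norm_num [pvBounds, pvB02, pvB34]
  split_ifs <;> omega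

-- ===== VERDICT =====
theorem assign_category_py_spec : Claim_equal_assign_category_py := by
  intro lineno name _
  unfold Spec_assign_category_py assign_category_py assign_category_py_alt
  norm_num [pvBounds, pvBisect_eval, pvLabels]
  split_ifs <;> first | rfl | omega | simp_all [dulce_chars]
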